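-- pv_equiv track=rewrite | github.com/cielavenir/codeiq_solutions | nabetani_takenori/tyama_codeiq3357.py | num2place
-- ===== SOURCE A (Python) =====
-- D=[[0,0],[1,0],[2,0],[2,1],[2,2],[1,2],[0,2],[0,1]]
--
-- def num2place(n):
-- 	n-=1
-- 	x=y=0
-- 	z=1
-- 	while n>0:
-- 		x+=D[n%8][0]*z
-- 		y+=D[n%8][1]*z
-- 		n//=8
-- 		z*=3
-- 	return (x,y)
-- ===== SOURCE B (Python) =====
-- D=[[0,0],[1,0],[2,0],[2,1],[2,2],[1,2],[0,2],[0,1]]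
--
-- def num2place(n):
-- 	m = n - 1
-- 	digits = []
-- 	while m > 0:
-- 		digits.append(m % 8)
-- 		m //= 8
-- 	x = y = 0
-- 	for d in reversed(digits):
-- 		x = 3 * x + D[d][0]
-- 		y = 3 * y + D[d][1]
-- 	return (x, y)
-- ===== Notes on version B (the rewrite author's own statement) =====
-- stated objective: alternative
-- what changed: Replaced the single accumulating while-loop (x,y accumulators with an explicit power-of-3 scale z) by two staged passes: first extract the base-8 digits of n-1 into a list, then Horner-fold over the reversed digit list (most-significant first), so no scale variable is maintained.
import Mathlib
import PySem

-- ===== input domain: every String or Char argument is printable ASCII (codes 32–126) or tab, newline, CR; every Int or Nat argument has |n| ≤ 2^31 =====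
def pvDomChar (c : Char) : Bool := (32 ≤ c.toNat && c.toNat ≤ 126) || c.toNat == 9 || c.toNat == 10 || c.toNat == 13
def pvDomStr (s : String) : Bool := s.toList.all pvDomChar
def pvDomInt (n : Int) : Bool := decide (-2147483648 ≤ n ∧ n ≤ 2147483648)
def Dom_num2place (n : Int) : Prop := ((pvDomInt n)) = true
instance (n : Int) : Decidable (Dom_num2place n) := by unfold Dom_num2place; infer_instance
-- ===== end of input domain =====

-- B replaces A's single accumulating while-loop (x,y and a power-of-3 scale z) by two staged
-- passes: extract the base-8 digits of n-1 into a list, then Horner-fold the reversed list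
-- (objective: alternative; same asymptotic cost).

-- the module-level table D (identical in A and B)
def pD : List (Int × Int) := [(0,0),(1,0),(2,0),(2,1),(2,2),(1,2),(0,2),(0,1)]

-- ===== PORT A =====
-- the while-loop of A; index n%8 is always in 0..7, so pyGet? never misses and .getD is exact
def num2placeLoop (n x y z : Int) : Int × Int :=
  if h : n > 0 then
    let d := (PySem.List.pyGet? pD (PySem.Int.mod n 8)).getD (0,0)
    num2placeLoop (PySem.Int.floordiv n 8) (x + d.1 * z) (y + d.2 * z) (z * 3)
  else (x, y)
termination_by n.toNat
decreasing_by
  rw [PySem.Int.floordiv_eq_ediv_of_pos (by omega : (0:Int) < 8)]; omega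

def num2place (n : Int) : Int × Int := num2placeLoop (n - 1) 0 0 1

-- ===== PORT B =====
-- stage 1 of B: the digit-collecting while-loop (least-significant digit first)
def pDigits (m : Int) : List Int :=
  if h : m > 0 then (PySem.Int.mod m 8) :: pDigits (PySem.Int.floordiv m 8) else []
termination_by m.toNat
decreasing_by
  rw [PySem.Int.floordiv_eq_ediv_of_pos (by omega : (0:Int) < 8)]; omega

-- stage 2 of B: one step of the Horner fold over the reversed digit list
def pStep (p : Int × Int) (d : Int) : Int × Int :=
  let c := (PySem.List.pyGet? pD d).getD (0,0)
  (3 * p.1 + c.1, 3 * p.2 + c.2)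

def num2place_alt (n : Int) : Int × Int :=
  ((pDigits (n - 1)).reverse).foldl pStep (0, 0)

-- ===== PRECONDITION & SPEC =====
def Spec_num2place (n : Int) (out : Int × Int) : Prop := out = num2place_alt n
instance (n : Int) (out : Int × Int) : Decidable (Spec_num2place n out) := by unfold Spec_num2place; infer_instance

-- ===== CLAIM (what is proved, stated in full; the proofs are below) =====
def Claim_equal_num2place : Prop := ∀ (n : Int), Dom_num2place n → Spec_num2place n (num2place n)

-- ===== LEMMAS AND PROOFS =====

-- B's value as a function of m: recurrence of the Horner fold over the reversed digit list
def pH (m : Int) : Int × Int := ((pDigits m).reverse).foldl pStep (0, 0)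

theorem pH_rec (m : Int) (h : m > 0) :
    pH m = pStep (pH (PySem.Int.floordiv m 8)) (PySem.Int.mod m 8) := by
  unfold pH
  rw [pDigits]
  simp [h, List.foldl_append]

theorem pH_base (m : Int) (h : ¬ m > 0) : pH m = (0, 0) := by
  unfold pH; rw [pDigits]; simp [h]

-- loop invariant: A's loop computes the accumulators plus z times B's Horner value
theorem loop_eq_pH (k : Nat) :
    ∀ (n x y z : Int), n.toNat ≤ k →
      num2placeLoop n x y z = (x + z * (pH n).1, y + z * (pH n).2) := by
  induction k with
  | zero =>
    intro n x y z hn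
    have hle : ¬ n > 0 := by omega
    rw [num2placeLoop, pH_base n hle]
    simp [hle]
  | succ k ih =>
    intro n x y z hn
    by_cases hpos : n > 0
    · have hdiv : PySem.Int.floordiv n 8 = n / 8 :=
        PySem.Int.floordiv_eq_ediv_of_pos (by omega)
      have hk : (PySem.Int.floordiv n 8).toNat ≤ k := by rw [hdiv]; omega
      rw [num2placeLoop]
      simp only [hpos, dite_true]
      rw [ih _ _ _ _ hk, pH_rec n hpos]
      unfold pStep
      exact Prod.ext (by dsimp; ring) (by dsimp; ring)
    · rw [num2placeLoop, pH_base n hpos]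
      simp [hpos]

-- ===== VERDICT (by name: the statement is the Claim_ definition above) =====
theorem num2place_spec : Claim_equal_num2place := by
  intro n _
  unfold Spec_num2place num2place num2place_alt
  rw [loop_eq_pH (n - 1).toNat _ _ _ _ le_rfl]
  simp [pH]
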